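-- pv_equiv track=rewrite | github.com/AnnaAdjikiss/Python | PythonHomework/Homework3/Task2.py | pairs_multiplied
-- ===== SOURCE A (Python) =====
-- def pairs_multiplied(some_list):
--     result = []
--     while len(some_list) > 1:
--         result.append(some_list[0]*some_list[-1])
--         del some_list[0]
--         del some_list[-1]
--     if len(some_list) ==1: result.append(some_list[0]**2)
--     return result
-- ===== SOURCE B (Python) =====
-- def pairs_multiplied(some_list):
--     n = len(some_list)
--     result = [some_list[i] * some_list[n - 1 - i] for i in range(n // 2)]
--     if n % 2:
--         result.append(some_list[n // 2] ** 2)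
--     return result
-- ===== Notes on version B (the rewrite author's own statement) =====
-- stated objective: faster
-- what changed: Replaces the destructive while-loop that repeatedly deletes the first and last element (each front deletion is O(n)) with a single index-based pass pairing i with n-1-i, squaring the middle element of an odd-length list; B does not mutate its argument while A empties it.
import Mathlib
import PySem

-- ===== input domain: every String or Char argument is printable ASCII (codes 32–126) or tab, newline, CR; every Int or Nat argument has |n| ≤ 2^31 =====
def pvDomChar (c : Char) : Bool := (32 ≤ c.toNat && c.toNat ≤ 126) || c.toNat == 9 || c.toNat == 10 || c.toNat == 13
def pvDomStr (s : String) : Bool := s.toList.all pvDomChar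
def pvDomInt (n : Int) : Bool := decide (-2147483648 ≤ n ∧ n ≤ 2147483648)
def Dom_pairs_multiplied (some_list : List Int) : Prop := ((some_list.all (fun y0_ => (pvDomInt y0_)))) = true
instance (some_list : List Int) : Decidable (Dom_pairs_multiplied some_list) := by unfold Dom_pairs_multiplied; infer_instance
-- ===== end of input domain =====

-- B replaces A's destructive delete-front/delete-back while loop by one index-based pass
-- (pair i with n-1-i); equivalence is about the RETURN value only — Python A empties its
-- argument in place, B leaves it untouched.

-- ===== PORT A =====
-- while len(l) > 1: append l[0]*l[-1]; del l[0]; del l[-1]  — the two deletions give l.tail.dropLast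
def pairs_multiplied (some_list : List Int) : List Int :=
  if h : some_list.length > 1 then
    (some_list.headD 0 * some_list.getLastD 0) :: pairs_multiplied some_list.tail.dropLast
  else if some_list.length = 1 then [some_list.headD 0 ^ 2] else []
termination_by some_list.length
decreasing_by rw [List.length_dropLast, List.length_tail]; omega

-- ===== PORT B =====
def pairs_multiplied_alt (some_list : List Int) : List Int :=
  let n := some_list.length
  ((List.range (n / 2)).map (fun i => some_list.getD i 0 * some_list.getD (n - 1 - i) 0)) ++
    (if n % 2 = 1 then [some_list.getD (n / 2) 0 ^ 2] else [])

-- ===== PRECONDITION & SPEC =====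
def Spec_pairs_multiplied (some_list : List Int) (out : List Int) : Prop := out = pairs_multiplied_alt some_list
instance (some_list : List Int) (out : List Int) : Decidable (Spec_pairs_multiplied some_list out) := by unfold Spec_pairs_multiplied; infer_instance

-- ===== CLAIM (what is proved, stated in full; the proofs are below) =====
def Claim_equal_pairs_multiplied : Prop := ∀ (some_list : List Int), Dom_pairs_multiplied some_list → Spec_pairs_multiplied some_list (pairs_multiplied some_list)

-- ===== LEMMAS AND PROOFS =====

-- getD of the middle list in terms of the original
theorem getD_tail_dropLast (l : List Int) (i : Nat) (h : i + 2 < l.length) :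
    l.tail.dropLast.getD i 0 = l.getD (i + 1) 0 := by
  have h1 : i < l.tail.dropLast.length := by
    rw [List.length_dropLast, List.length_tail]; omega
  have h2 : i + 1 < l.length := by omega
  rw [List.getD_eq_getElem _ _ h1, List.getD_eq_getElem _ _ h2]
  rw [List.getElem_dropLast, List.getElem_tail]

-- B satisfies A's recurrence on lists of length ≥ 2
theorem alt_step (l : List Int) (h : l.length > 1) :
    pairs_multiplied_alt l =
      (l.headD 0 * l.getLastD 0) :: pairs_multiplied_alt l.tail.dropLast := by
  obtain ⟨x, xs, rfl⟩ : ∃ x xs, l = x :: xs := by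
    cases l with
    | nil => simp at h
    | cons x xs => exact ⟨x, xs, rfl⟩
  set n := (x :: xs).length with hn
  have hn2 : n ≥ 2 := h
  have hm : (x :: xs).tail.dropLast.length = n - 2 := by
    simp [List.length_dropLast, hn]
  have hdiv : n / 2 = (n - 2) / 2 + 1 := by omega
  have hhead : (x :: xs).headD 0 = (x :: xs).getD 0 0 := by simp
  have hlast : (x :: xs).getLastD 0 = (x :: xs).getD (n - 1 - 0) 0 := by
    have h1 : n - 1 - 0 < n := by omega
    rw [List.getD_eq_getElem _ _ h1]
    rw [List.getLastD_eq_getLast? , List.getLast?_eq_getElem?]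
    rw [List.getElem?_eq_getElem (by simpa [hn.symm] using h1)]
    simp [hn.symm]
  simp only [pairs_multiplied_alt, hm, ← hn, hdiv, List.range_succ_eq_map,
    List.map_cons, List.map_map]
  rw [hhead, hlast]
  simp only [List.cons_append, List.cons.injEq]
  refine ⟨trivial, ?_⟩
  congr 1
  · apply List.map_congr_left
    intro i hi
    have hi' : i < (n - 2) / 2 := List.mem_range.mp hi
    have e1 : (x :: xs).tail.dropLast.getD i 0 = (x :: xs).getD (i + 1) 0 :=
      getD_tail_dropLast _ _ (by omega)
    have e2 : (x :: xs).tail.dropLast.getD (n - 2 - 1 - i) 0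
        = (x :: xs).getD (n - 2 - 1 - i + 1) 0 :=
      getD_tail_dropLast _ _ (by omega)
    have e3 : n - 2 - 1 - i + 1 = n - 1 - (i + 1) := by omega
    simp only [Function.comp_apply, Nat.succ_eq_add_one]
    rw [e1, e2, e3]
  · have hpar : (n - 2) % 2 = n % 2 := by omega
    rw [hpar]
    by_cases hodd : n % 2 = 1
    · simp only [hodd, if_true]
      have e : (x :: xs).tail.dropLast.getD ((n - 2) / 2) 0
          = (x :: xs).getD ((n - 2) / 2 + 1) 0 :=
        getD_tail_dropLast _ _ (by omega)
      have e2 : (n - 2) / 2 + 1 = n / 2 := by omega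
      rw [e, e2]
    · simp [hodd]

theorem pairs_eq (l : List Int) : pairs_multiplied l = pairs_multiplied_alt l := by
  induction l using pairs_multiplied.induct with
  | case1 l h ih =>
      rw [pairs_multiplied, dif_pos h, ih, alt_step l h]
  | case2 l h h1 =>
      obtain ⟨x, rfl⟩ := List.length_eq_one_iff.mp h1
      rw [pairs_multiplied, dif_neg h]
      simp [pairs_multiplied_alt]
  | case3 l h h1 =>
      have hz : l.length = 0 := by omega
      rw [List.length_eq_zero_iff] at hz
      subst hz
      rw [pairs_multiplied, dif_neg h]
      simp [pairs_multiplied_alt]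

-- ===== VERDICT (by name: the statement is the Claim_ definition above) =====
theorem pairs_multiplied_spec : Claim_equal_pairs_multiplied := by
  intro l _
  unfold Spec_pairs_multiplied
  exact pairs_eq l
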